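-- pv_equiv track=rewrite | github.com/dosdos/Google-CodeJam | 2020/qualification_round/C_cryptopangrams/C.py | solve
-- ===== SOURCE A (Python) =====
-- def solve(case, se):
--     event_list = []
--     for i, event in enumerate(se):
--         event_list.append([i, event[0], event[1]])
--     event_list = sorted(event_list, key=lambda x: x[1])
--     assigned_to_j = set()
--     assigned_to_c = set()
--     result = [''] * len(se)
--     for idx, start, end in event_list:
--         if set(i for i in range(start, end)).isdisjoint(assigned_to_j):
--             result[idx] = 'J'
--             for i in range(start, end):
--                 assigned_to_j.add(i)
--         elif set(i for i in range(start, end)).isdisjoint(assigned_to_c):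
--             result[idx] = 'C'
--             for i in range(start, end):
--                 assigned_to_c.add(i)
--         else:
--             return "Case #{}: IMPOSSIBLE".format(case)
--     return "Case #{}: {}".format(case, ''.join(result))
-- ===== SOURCE B (Python) =====
-- def solve(case, se):
--     # Greedy over events in order of start time. Each guard's busy time is the
--     # region (-inf, busy): an event fits a guard iff its slice [s, e) is
--     # disjoint from that region, i.e. not (s < busy and s < e); taking the
--     # event extends the busy region's right end to max(busy, e).
--     events = sorted(enumerate(se), key=lambda p: p[1][0])
--     labels = [''] * len(se)
--     busy_j = busy_c = None
--     for i, ev in events: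
--         s, e = ev[0], ev[1]
--         if busy_j is None or not (s < busy_j and s < e):
--             labels[i] = 'J'
--             busy_j = e if busy_j is None else max(busy_j, e)
--         elif busy_c is None or not (s < busy_c and s < e):
--             labels[i] = 'C'
--             busy_c = e if busy_c is None else max(busy_c, e)
--         else:
--             return "Case #{}: IMPOSSIBLE".format(case)
--     return "Case #{}: {}".format(case, ''.join(labels))
-- ===== Notes on version B (the rewrite author's own statement) =====
-- stated objective: alternative
-- what changed: Instead of materialising every occupied minute of each interval into per-resource Python sets and testing set(range(start,end)).isdisjoint, B sorts events by start once and keeps only the right end of each guard's busy region, deciding each assignment with an interval-disjointness comparison; Pre_ excludes only inputs on which A raises IndexError (an event list with fewer than two entries).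
import Mathlib
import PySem

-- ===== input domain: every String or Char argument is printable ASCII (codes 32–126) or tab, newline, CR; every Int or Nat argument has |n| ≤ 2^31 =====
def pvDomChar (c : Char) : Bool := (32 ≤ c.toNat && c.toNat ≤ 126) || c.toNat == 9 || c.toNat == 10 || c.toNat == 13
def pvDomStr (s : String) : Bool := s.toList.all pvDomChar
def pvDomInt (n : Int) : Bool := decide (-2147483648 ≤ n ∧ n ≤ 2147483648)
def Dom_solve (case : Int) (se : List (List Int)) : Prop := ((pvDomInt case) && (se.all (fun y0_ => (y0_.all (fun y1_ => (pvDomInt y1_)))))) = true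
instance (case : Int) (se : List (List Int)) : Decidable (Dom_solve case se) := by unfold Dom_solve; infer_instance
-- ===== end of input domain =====

-- B replaces A's per-minute occupancy sets by one busy-region right end per guard over the
-- start-sorted events; same return value on Pre_.

-- ===== PORT A =====
-- the loop 'for idx, start, end in event_list' with its early return "IMPOSSIBLE"
-- A's occupancy sets are hash sets whose order is never observed (only membership tests and
-- adds), so they are ported as Std.HashSet Int — exact, and evaluable on large intervals.
-- 'set(i for i in range(start, end)).isdisjoint(assigned)': a range has no duplicates, so the
-- test is exactly 'no element of the range is a member of assigned'.
def solveALoop (case : Int) : List (Int × Int × Int) → Std.HashSet Int → Std.HashSet Int → List String → String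
  | [], _, _, result =>
      "Case #" ++ PySem.Int.toStr case ++ ": " ++ PySem.Str.join "" result
  | (idx, start, end_) :: rest, aj, ac, result =>
      if (PySem.List.pyRange start end_).all (fun x => !(aj.contains x)) then
        solveALoop case rest ((PySem.List.pyRange start end_).foldl (fun s i => s.insert i) aj) ac
          (result.set idx.toNat "J")
      else if (PySem.List.pyRange start end_).all (fun x => !(ac.contains x)) then
        solveALoop case rest aj ((PySem.List.pyRange start end_).foldl (fun s i => s.insert i) ac)
          (result.set idx.toNat "C")
      else "Case #" ++ PySem.Int.toStr case ++ ": IMPOSSIBLE"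

def solve (case : Int) (se : List (List Int)) : String :=
  -- event[0] / event[1] are exact as pyGetD under Pre_solve (every event has length ≥ 2)
  let event_list := (PySem.List.enumerate se).map
    (fun p => (p.1, PySem.List.pyGetD p.2 0 0, PySem.List.pyGetD p.2 1 0))
  let event_list := PySem.List.sorted event_list (fun x => x.2.1)
  solveALoop case event_list (∅ : Std.HashSet Int) (∅ : Std.HashSet Int) (List.replicate se.length "")

-- ===== PORT B =====
-- Source B's test 'busy is None or not (s < busy and s < e)'
def pvFree (o : Option Int) (s e : Int) : Bool :=
  match o with
  | none => true
  | some m => !(decide (s < m) && decide (s < e))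

-- Source B's update 'busy = e if busy is None else max(busy, e)'
def pvBump (o : Option Int) (e : Int) : Option Int :=
  match o with
  | none => some e
  | some m => some (max m e)

def solveBLoop (case : Int) : List (Int × List Int) → Option Int → Option Int → List String → String
  | [], _, _, labels =>
      "Case #" ++ PySem.Int.toStr case ++ ": " ++ PySem.Str.join "" labels
  | (i, ev) :: rest, busyJ, busyC, labels =>
      let s := PySem.List.pyGetD ev 0 0   -- ev[0], exact under Pre_solve
      let e := PySem.List.pyGetD ev 1 0   -- ev[1]
      if pvFree busyJ s e then
        solveBLoop case rest (pvBump busyJ e) busyC (labels.set i.toNat "J")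
      else if pvFree busyC s e then
        solveBLoop case rest busyJ (pvBump busyC e) (labels.set i.toNat "C")
      else "Case #" ++ PySem.Int.toStr case ++ ": IMPOSSIBLE"

def solve_alt (case : Int) (se : List (List Int)) : String :=
  let events := PySem.List.sorted (PySem.List.enumerate se) (fun p => PySem.List.pyGetD p.2 0 0)
  solveBLoop case events none none (List.replicate se.length "")

-- ===== PRECONDITION & SPEC =====
-- Pre_ excludes exactly the inputs where Python A raises IndexError: some event list with fewer
-- than two entries (event[0] / event[1]).
def Pre_solve (case : Int) (se : List (List Int)) : Prop :=
  (se.all (fun e => decide (2 ≤ e.length))) = true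
instance (case : Int) (se : List (List Int)) : Decidable (Pre_solve case se) := by
  unfold Pre_solve; infer_instance

def pvWitness_solve : Int × List (List Int) := (1, [[0, 2], [1, 3], [2, 4]])

def Spec_solve (case : Int) (se : List (List Int)) (out : String) : Prop := out = solve_alt case se
instance (case : Int) (se : List (List Int)) (out : String) : Decidable (Spec_solve case se out) := by unfold Spec_solve; infer_instance

-- ===== CLAIM (what is proved, stated in full; the proofs are below) =====
def Claim_equal_solve : Prop := ∀ (case : Int) (se : List (List Int)), Dom_solve case se → Pre_solve case se → Spec_solve case se (solve case se)

-- ===== LEMMAS AND PROOFS =====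

-- start / end of an enumerated event, and A's triple view of it
def pvStart (p : Int × List Int) : Int := PySem.List.pyGetD p.2 0 0
def pvEnd (p : Int × List Int) : Int := PySem.List.pyGetD p.2 1 0
def pvTri (p : Int × List Int) : Int × Int × Int := (p.1, pvStart p, pvEnd p)

-- B's Option Int summarises A's occupancy set:  none ↔ nothing occupied yet;
-- some m ↔ all occupied minutes are < m and a tail interval [s0, m) (possibly empty) is fully
-- occupied, with s0 below every start still to be processed.
def pvInv (a : Std.HashSet Int) (o : Option Int) (evs : List (Int × List Int)) : Prop :=
  match o with
  | none => ∀ x : Int, x ∉ a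
  | some m => (∀ x ∈ a, x < m) ∧
      ∃ s0, (∀ p ∈ evs, s0 ≤ pvStart p) ∧ (∀ x, s0 ≤ x → x < m → x ∈ a)

theorem pvInv_weaken (a : Std.HashSet Int) (o : Option Int) (q : Int × List Int)
    (evs : List (Int × List Int)) (h : pvInv a o (q :: evs)) : pvInv a o evs := by
  cases o with
  | none => exact h
  | some m =>
      obtain ⟨h1, s0, h2, h3⟩ := h
      exact ⟨h1, s0, fun p hp => h2 p (List.mem_cons_of_mem _ hp), h3⟩

theorem pvMemFoldlInsert (l : List Int) (s : Std.HashSet Int) (x : Int) :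
    x ∈ l.foldl (fun s i => s.insert i) s ↔ x ∈ s ∨ x ∈ l := by
  induction l generalizing s with
  | nil => simp
  | cons y l ih =>
      simp only [List.foldl_cons, ih, Std.HashSet.mem_insert, beq_iff_eq, List.mem_cons]
      tauto

theorem pvFree_some (m s e : Int) : pvFree (some m) s e = true ↔ (m ≤ s ∨ e ≤ s) := by
  simp only [pvFree, Bool.not_eq_true', Bool.and_eq_false_iff, decide_eq_false_iff_not, not_lt]

-- A's disjointness test, characterised through B's summary (needs the sortedness lower bound)
theorem pvFree_iff (a : Std.HashSet Int) (o : Option Int) (p : Int × List Int)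
    (evs : List (Int × List Int)) (h : pvInv a o (p :: evs)) :
    ((PySem.List.pyRange (pvStart p) (pvEnd p)).all (fun x => !(a.contains x)) = true) ↔
      pvFree o (pvStart p) (pvEnd p) = true := by
  rw [List.all_eq_true]
  have hmem : ∀ x : Int, ((!(a.contains x)) = true) ↔ x ∉ a := by
    intro x; cases hc : a.contains x <;> simp [Std.HashSet.mem_iff_contains, hc]
  cases o with
  | none =>
      simp only [pvFree, iff_true]
      intro x _; exact (hmem x).mpr (h x)
  | some m =>
      obtain ⟨h1, s0, h2, h3⟩ := h
      rw [pvFree_some]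
      constructor
      · intro hd
        by_contra hm
        push_neg at hm
        obtain ⟨hm1, hm2⟩ := hm
        have hs0 : s0 ≤ pvStart p := h2 p (by simp)
        exact (hmem _).mp
          (hd (pvStart p) (by rw [PySem.List.mem_pyRange_one]; omega))
          (h3 _ hs0 (by omega))
      · intro hcond x hx
        rw [PySem.List.mem_pyRange_one] at hx
        rw [hmem]
        intro hxa
        have := h1 x hxa
        rcases hcond with h' | h' <;> omega


-- invariant re-establishment after the occupied range is added and the busy end bumped
theorem pvInv_update (a : Std.HashSet Int) (o : Option Int) (i : Int) (ev : List Int)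
    (rest : List (Int × List Int))
    (hh : ∀ q ∈ rest, pvStart (i, ev) ≤ pvStart q)
    (h : pvInv a o ((i, ev) :: rest))
    (hfree : pvFree o (pvStart (i, ev)) (pvEnd (i, ev)) = true) :
    pvInv ((PySem.List.pyRange (pvStart (i, ev)) (pvEnd (i, ev))).foldl (fun s i => s.insert i) a)
      (pvBump o (pvEnd (i, ev))) rest := by
  cases o with
  | none =>
      refine ⟨?_, pvStart (i, ev), hh, ?_⟩
      · intro x hx
        rw [pvMemFoldlInsert] at hx
        rcases hx with hx | hx
        · exact absurd hx (h x)
        · rw [PySem.List.mem_pyRange_one] at hx; omega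
      · intro x h1 h2
        rw [pvMemFoldlInsert, PySem.List.mem_pyRange_one]
        exact Or.inr ⟨h1, h2⟩
  | some m =>
      obtain ⟨h1, s0, h2, h3⟩ := h
      have hs0 : s0 ≤ pvStart (i, ev) := h2 (i, ev) (by simp)
      rw [pvFree_some] at hfree
      refine ⟨?_, pvStart (i, ev), hh, ?_⟩
      · intro x hx
        rw [pvMemFoldlInsert] at hx
        rcases hx with hx | hx
        · have := h1 x hx; show x < max m (pvEnd (i, ev)); omega
        · rw [PySem.List.mem_pyRange_one] at hx; show x < max m (pvEnd (i, ev)); omega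
      · intro x hx1 hx2
        have hx2' : x < max m (pvEnd (i, ev)) := hx2
        rw [pvMemFoldlInsert, PySem.List.mem_pyRange_one]
        by_cases hxe : x < pvEnd (i, ev)
        · exact Or.inr ⟨hx1, hxe⟩
        · exact Or.inl (h3 x (by omega) (by omega))


theorem pvLoop_eq (case : Int) (evs : List (Int × List Int)) (aj ac : Std.HashSet Int)
    (bj bc : Option Int) (res : List String)
    (hs : evs.Pairwise (fun p q => pvStart p ≤ pvStart q))
    (hj : pvInv aj bj evs) (hc : pvInv ac bc evs) :
    solveALoop case (evs.map pvTri) aj ac res = solveBLoop case evs bj bc res := by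
  induction evs generalizing aj ac bj bc res with
  | nil => rfl
  | cons p rest ih =>
      obtain ⟨i, ev⟩ := p
      rw [List.pairwise_cons] at hs
      obtain ⟨hhead, hrest⟩ := hs
      have hdJ := pvFree_iff aj bj (i, ev) rest hj
      have hdC := pvFree_iff ac bc (i, ev) rest hc
      show solveALoop case (pvTri (i, ev) :: rest.map pvTri) aj ac res = _
      rw [show pvTri (i, ev) = (i, pvStart (i, ev), pvEnd (i, ev)) from rfl]
      simp only [solveALoop, solveBLoop]
      rw [show (PySem.List.pyGetD ev 0 0) = pvStart (i, ev) from rfl,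
          show (PySem.List.pyGetD ev 1 0) = pvEnd (i, ev) from rfl]
      by_cases hJ : pvFree bj (pvStart (i, ev)) (pvEnd (i, ev)) = true
      · rw [if_pos (hdJ.mpr hJ), if_pos hJ]
        exact ih _ _ _ _ _ hrest
          (pvInv_update aj bj i ev rest hhead hj hJ)
          (pvInv_weaken _ _ _ _ hc)
      · rw [if_neg (fun hd => hJ (hdJ.mp hd)), if_neg hJ]
        by_cases hC : pvFree bc (pvStart (i, ev)) (pvEnd (i, ev)) = true
        · rw [if_pos (hdC.mpr hC), if_pos hC]
          exact ih _ _ _ _ _ hrest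
            (pvInv_weaken _ _ _ _ hj)
            (pvInv_update ac bc i ev rest hhead hc hC)
        · rw [if_neg (fun hd => hC (hdC.mp hd)), if_neg hC]

-- a stable key-sort of a mapped list is the mapped key-sort (keys agree through the map)
theorem pvInsertBy_map {α β : Type} (p : β → β → Bool) (f : α → β) (x : α) (ys : List α) :
    PySem.List.insertBy p (f x) (ys.map f) =
      (PySem.List.insertBy (fun a b => p (f a) (f b)) x ys).map f := by
  induction ys with
  | nil => rfl
  | cons y ys ih =>
      simp only [List.map_cons, PySem.List.insertBy]
      split_ifs with h
      · simp
      · simp [ih]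

theorem pvSorted_map {α β κ : Type} [LT κ] [DecidableLT κ] (l : List α) (f : α → β) (k : β → κ) :
    PySem.List.sorted (l.map f) k = (PySem.List.sorted l (fun a => k (f a))).map f := by
  rw [PySem.List.sorted_eq_foldl_insertBy, PySem.List.sorted_eq_foldl_insertBy]
  suffices h : ∀ acc : List α,
      (l.map f).foldl (fun acc x => PySem.List.insertBy (fun a b => decide (k a < k b)) x acc) (acc.map f) =
        (l.foldl (fun acc x => PySem.List.insertBy (fun a b => decide (k (f a) < k (f b))) x acc) acc).map f by
    simpa using h []
  induction l with
  | nil => intro acc; simp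
  | cons x xs ih =>
      intro acc
      simp only [List.map_cons, List.foldl_cons]
      rw [pvInsertBy_map (fun a b => decide (k a < k b)) f x acc]
      exact ih _

-- ===== VERDICT (by name: the statement is the Claim_ definition above) =====
theorem solve_spec : Claim_equal_solve := by
  intro case se _ _
  show solveALoop case
      (PySem.List.sorted ((PySem.List.enumerate se).map pvTri) (fun x => x.2.1))
      (∅ : Std.HashSet Int) (∅ : Std.HashSet Int) (List.replicate se.length "") =
    solveBLoop case (PySem.List.sorted (PySem.List.enumerate se) pvStart) none none
      (List.replicate se.length "")
  rw [pvSorted_map (PySem.List.enumerate se) pvTri (fun x => x.2.1),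
      show (fun (a : Int × List Int) => (pvTri a).2.1) = pvStart from rfl]
  exact pvLoop_eq case _ (∅ : Std.HashSet Int) (∅ : Std.HashSet Int) none none _
    (PySem.List.sorted_pairwise _ pvStart) (fun x => Std.HashSet.not_mem_empty)
    (fun x => Std.HashSet.not_mem_empty)
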